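-- pv_equiv track=rewrite | github.com/daniel-reich/ubiquitous-fiesta | 9HWMgvjF7p3zhWBdk_23.py | keys_and_values
-- ===== SOURCE A (Python) =====
-- def keys_and_values(d):
--   keys, vals = [], []
--   for key, val in d.items():
--     keys.append(key)
--   keys = sorted(keys)
--   for key in keys:
--     vals.append(d[key])
--   return [keys, vals]
-- ===== SOURCE B (Python) =====
-- def keys_and_values(d):
--   # single pass: keep the (key, value) pairs in a list sorted by key,
--   # locating each pair's place by binary search and inserting it there
--   # (no sorted() call and no dict lookups)
--   items = []
--   for kv in d.items():
--     lo, hi = 0, len(items)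
--     while lo < hi:
--       mid = (lo + hi) // 2
--       if items[mid][0] <= kv[0]:
--         lo = mid + 1
--       else:
--         hi = mid
--     items.insert(lo, kv)
--   keys = [k for k, v in items]
--   vals = [v for k, v in items]
--   return [keys, vals]
-- ===== Notes on version B (the rewrite author's own statement) =====
-- stated objective: alternative
-- what changed: B replaces A's sort-keys-then-look-up-each-value scheme by a single pass that keeps the (key,value) pairs in a key-ordered list, binary-searching each pair's position and inserting it there, so neither sorted() nor any dict lookup is used.
import Mathlib
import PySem

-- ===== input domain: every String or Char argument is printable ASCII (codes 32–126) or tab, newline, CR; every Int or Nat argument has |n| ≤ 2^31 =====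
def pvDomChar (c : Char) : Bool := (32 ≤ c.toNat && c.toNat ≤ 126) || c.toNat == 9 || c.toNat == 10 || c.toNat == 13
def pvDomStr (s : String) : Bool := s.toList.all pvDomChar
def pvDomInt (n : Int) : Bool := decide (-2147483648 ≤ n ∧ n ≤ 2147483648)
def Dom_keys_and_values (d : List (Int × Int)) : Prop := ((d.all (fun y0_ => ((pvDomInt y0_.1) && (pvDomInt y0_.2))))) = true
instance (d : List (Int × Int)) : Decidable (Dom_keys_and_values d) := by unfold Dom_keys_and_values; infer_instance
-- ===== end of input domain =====

-- B replaces A's sort-then-look-up scheme by a single pass that keeps the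
-- (key, value) pairs in key order, binary-searching each pair's place and
-- inserting it there (alternative; no sorted() call and no dict lookups).

-- ===== PORT A =====
-- d[key] is ported with Dict.getD; the default 0 is never hit, since every
-- looked-up key comes from d itself.
def keys_and_values (d : List (Int × Int)) : List (List Int) :=
  let keys := d.foldl (fun acc kv => acc ++ [kv.1]) []
  let keys := PySem.List.sorted keys (fun k => k) false
  let vals := keys.foldl (fun acc k => acc ++ [PySem.Dict.getD (PySem.Dict.mk d) k 0]) []
  [keys, vals]

-- ===== PORT B =====
-- Source B's binary-search while loop; items[mid] is in range whenever lo < hi ≤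
-- length, so the indexing is ported with getD (the default is never hit).
-- the fuel argument only makes the recursion structural: hi - lo shrinks each
-- step, so any fuel ≥ hi - lo (the call below passes the list length) is enough
def kavFindPos (items : List (Int × Int)) (k : Int) : Nat → Nat → Nat → Nat
  | fuel + 1, lo, hi =>
    if lo < hi then
      let mid := (lo + hi) / 2
      if (items.getD mid (0, 0)).1 ≤ k then kavFindPos items k fuel (mid + 1) hi
      else kavFindPos items k fuel lo mid
    else lo
  | 0, lo, _ => lo

def keys_and_values_alt (d : List (Int × Int)) : List (List Int) :=
  let items := d.foldl
    (fun acc kv => PySem.List.insert acc ((kavFindPos acc kv.1 acc.length 0 acc.length : Nat) : Int) kv) []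
  let keys := items.map (fun kv => kv.1)
  let vals := items.map (fun kv => kv.2)
  [keys, vals]

-- ===== PRECONDITION & SPEC =====
-- The argument is a Python dict: the association list has pairwise-distinct
-- keys (a Python dict can never present duplicate keys, so this excludes no
-- input the Python function can actually receive).
def Pre_keys_and_values (d : List (Int × Int)) : Prop := (d.map Prod.fst).Nodup
instance (d : List (Int × Int)) : Decidable (Pre_keys_and_values d) := by unfold Pre_keys_and_values; infer_instance
def pvWitness_keys_and_values : (List (Int × Int)) := [(3, 10), (1, 20), (2, 30)]

def Spec_keys_and_values (d : List (Int × Int)) (out : List (List Int)) : Prop := out = keys_and_values_alt d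
instance (d : List (Int × Int)) (out : List (List Int)) : Decidable (Spec_keys_and_values d out) := by unfold Spec_keys_and_values; infer_instance

-- ===== CLAIM (what is proved, stated in full; the proofs are below) =====
def Claim_equal_keys_and_values : Prop := ∀ (d : List (Int × Int)), Dom_keys_and_values d → Pre_keys_and_values d → Spec_keys_and_values d (keys_and_values d)

-- ===== LEMMAS AND PROOFS =====

-- key monotonicity along a (≤ by key)-pairwise list
theorem pairwise_le_getElem {l : List (Int × Int)}
    (h : l.Pairwise (fun a b => a.1 ≤ b.1)) {i j : Nat} (hij : i ≤ j)
    (hj : j < l.length) : (l[i]'(lt_of_le_of_lt hij hj)).1 ≤ (l[j]'hj).1 := by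
  rcases Nat.eq_or_lt_of_le hij with rfl | hlt
  · exact le_refl _
  · exact (List.pairwise_iff_getElem.mp h) i j _ hj hlt

-- B side: specification of the binary search — every index left of the result
-- has key ≤ k and every index at/right of it has key > k
theorem kavFindPos_eq_left (items : List (Int × Int)) (k : Int) (fuel lo hi : Nat)
    (hlt : lo < hi) (h : (items.getD ((lo + hi) / 2) (0, 0)).1 ≤ k) :
    kavFindPos items k (fuel + 1) lo hi = kavFindPos items k fuel ((lo + hi) / 2 + 1) hi := by
  rw [kavFindPos]; simp only [if_pos hlt]; exact if_pos h

theorem kavFindPos_eq_right (items : List (Int × Int)) (k : Int) (fuel lo hi : Nat)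
    (hlt : lo < hi) (h : ¬ (items.getD ((lo + hi) / 2) (0, 0)).1 ≤ k) :
    kavFindPos items k (fuel + 1) lo hi = kavFindPos items k fuel lo ((lo + hi) / 2) := by
  rw [kavFindPos]; simp only [if_pos hlt]; exact if_neg h

theorem kavFindPos_eq_stop (items : List (Int × Int)) (k : Int) (fuel lo hi : Nat)
    (h : ¬ lo < hi) : kavFindPos items k (fuel + 1) lo hi = lo := by
  rw [kavFindPos]; exact if_neg h

-- B side: specification of the binary search — every index left of the result
-- has key ≤ k and every index at/right of it has key > k
theorem kavFindPos_spec (items : List (Int × Int)) (k : Int)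
    (hs : items.Pairwise (fun a b => a.1 ≤ b.1)) :
    ∀ (fuel lo hi : Nat), hi - lo ≤ fuel → lo ≤ hi → hi ≤ items.length →
    (∀ j (hj : j < items.length), j < lo → (items[j]'hj).1 ≤ k) →
    (∀ j (hj : j < items.length), hi ≤ j → k < (items[j]'hj).1) →
    kavFindPos items k fuel lo hi ≤ items.length ∧
    (∀ j (hj : j < items.length), j < kavFindPos items k fuel lo hi → (items[j]'hj).1 ≤ k) ∧
    (∀ j (hj : j < items.length), kavFindPos items k fuel lo hi ≤ j → k < (items[j]'hj).1) := by
  intro fuel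
  induction fuel with
  | zero =>
    intro lo hi hfuel hle hhi Hlo Hhi
    have heq : lo = hi := by omega
    exact ⟨le_trans hle hhi, fun j hj hjlt => Hlo j hj hjlt,
      fun j hj hjge => Hhi j hj (heq ▸ hjge)⟩
  | succ fuel ih =>
    intro lo hi hfuel hle hhi Hlo Hhi
    by_cases hlt : lo < hi
    · by_cases hmid : (items.getD ((lo + hi) / 2) (0, 0)).1 ≤ k
      · have hmidlt : (lo + hi) / 2 < items.length :=
          lt_of_lt_of_le (by omega : (lo + hi) / 2 < hi) hhi
        have hmid' : (items[(lo + hi) / 2]'hmidlt).1 ≤ k := by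
          rwa [List.getD_eq_getElem items (0, 0) hmidlt] at hmid
        have Hlo' : ∀ j (hj : j < items.length), j < (lo + hi) / 2 + 1 → (items[j]'hj).1 ≤ k := by
          intro j hj hjlt
          exact le_trans (pairwise_le_getElem hs (by omega) hmidlt) hmid'
        rw [kavFindPos_eq_left items k fuel lo hi hlt hmid]
        exact ih ((lo + hi) / 2 + 1) hi (by omega) (by omega) hhi Hlo' Hhi
      · have hmidlt : (lo + hi) / 2 < items.length :=
          lt_of_lt_of_le (by omega : (lo + hi) / 2 < hi) hhi
        have hmid' : k < (items[(lo + hi) / 2]'hmidlt).1 := by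
          rw [List.getD_eq_getElem items (0, 0) hmidlt] at hmid
          exact lt_of_not_ge hmid
        have Hhi' : ∀ j (hj : j < items.length), (lo + hi) / 2 ≤ j → k < (items[j]'hj).1 := by
          intro j hj hjge
          exact lt_of_lt_of_le hmid' (pairwise_le_getElem hs hjge hj)
        rw [kavFindPos_eq_right items k fuel lo hi hlt hmid]
        exact ih lo ((lo + hi) / 2) (by omega) (by omega)
          (le_trans (by omega) hhi) Hlo Hhi'
    · rw [kavFindPos_eq_stop items k fuel lo hi hlt]
      have heq : lo = hi := le_antisymm hle (Nat.le_of_not_lt hlt)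
      exact ⟨le_trans hle hhi, Hlo, fun j hj hjge => Hhi j hj (heq ▸ hjge)⟩

-- B side: one step of the insertion pass
theorem kavStep_perm_pairwise (acc : List (Int × Int)) (kv : Int × Int)
    (hs : acc.Pairwise (fun a b => a.1 ≤ b.1)) :
    (PySem.List.insert acc ((kavFindPos acc kv.1 acc.length 0 acc.length : Nat) : Int) kv).Perm (kv :: acc) ∧
    (PySem.List.insert acc ((kavFindPos acc kv.1 acc.length 0 acc.length : Nat) : Int) kv).Pairwise
      (fun a b => a.1 ≤ b.1) := by
  obtain ⟨hple, Hl, Hr⟩ := kavFindPos_spec acc kv.1 hs acc.length 0 acc.length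
    (by omega) (Nat.zero_le _) (le_refl _)
    (fun j hj hjlt => absurd hjlt (Nat.not_lt_zero j))
    (fun j hj hjge => absurd hj (not_lt.mpr hjge))
  set p := kavFindPos acc kv.1 acc.length 0 acc.length with hp
  rw [PySem.List.insert_natCast acc p kv hple]
  constructor
  · exact List.perm_middle.trans (by rw [List.take_append_drop])
  · rw [List.pairwise_append]
    refine ⟨hs.sublist (List.take_sublist p acc), ?_, ?_⟩
    · refine List.pairwise_cons.mpr ⟨?_, hs.sublist (List.drop_sublist p acc)⟩
      intro b hb
      rcases List.mem_iff_getElem.mp hb with ⟨i, hi, rfl⟩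
      rw [List.length_drop] at hi
      rw [List.getElem_drop]
      exact le_of_lt (Hr (p + i) (by omega) (by omega))
    · intro a ha b hb
      rcases List.mem_iff_getElem.mp ha with ⟨i, hi, rfl⟩
      have hilen : i < acc.length := lt_of_lt_of_le hi (by simp)
      have hip : i < p := lt_of_lt_of_le hi (by simp [List.length_take])
      rw [List.getElem_take]
      have hak : (acc[i]'hilen).1 ≤ kv.1 := Hl i hilen hip
      rcases List.mem_cons.mp hb with rfl | hb
      · exact hak
      · rcases List.mem_iff_getElem.mp hb with ⟨j, hj, rfl⟩
        rw [List.length_drop] at hj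
        rw [List.getElem_drop]
        exact le_trans hak (le_of_lt (Hr (p + j) (by omega) (by omega)))

-- B side: the fold over d produces a permutation of d, sorted by key
theorem kavFold_perm_pairwise (d : List (Int × Int)) :
    (d.foldl (fun acc kv =>
        PySem.List.insert acc ((kavFindPos acc kv.1 acc.length 0 acc.length : Nat) : Int) kv) []).Perm d ∧
    (d.foldl (fun acc kv =>
        PySem.List.insert acc ((kavFindPos acc kv.1 acc.length 0 acc.length : Nat) : Int) kv) []).Pairwise
      (fun a b => a.1 ≤ b.1) := by
  suffices H : ∀ (acc : List (Int × Int)),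
      acc.Pairwise (fun a b => a.1 ≤ b.1) →
      (d.foldl (fun acc kv =>
          PySem.List.insert acc ((kavFindPos acc kv.1 acc.length 0 acc.length : Nat) : Int) kv) acc).Perm
        (d ++ acc) ∧
      (d.foldl (fun acc kv =>
          PySem.List.insert acc ((kavFindPos acc kv.1 acc.length 0 acc.length : Nat) : Int) kv) acc).Pairwise
        (fun a b => a.1 ≤ b.1) by
    simpa using H [] (by simp)
  induction d with
  | nil => intro acc h; simp [h]
  | cons kv rest ih =>
    intro acc h
    obtain ⟨hinsp, hinss⟩ := kavStep_perm_pairwise acc kv h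
    rcases ih _ hinss with ⟨hp, hs'⟩
    refine ⟨?_, hs'⟩
    simp only [List.foldl_cons]
    exact hp.trans ((List.Perm.append_left rest hinsp).trans List.perm_middle)

-- the sorted items are strictly increasing in their keys (keys are nodup)
theorem sorted_items_pairwise_lt (d : List (Int × Int)) (h : (d.map Prod.fst).Nodup) :
    (PySem.List.sorted d (fun kv => kv.1) false).Pairwise (fun a b => a.1 < b.1) := by
  have hpw := PySem.List.sorted_pairwise d (fun kv => kv.1)
  have hperm : (PySem.List.sorted d (fun kv => kv.1) false).Perm d :=
    PySem.List.sorted_perm d (fun kv => kv.1) false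
  have hnd : ((PySem.List.sorted d (fun kv => kv.1) false).map Prod.fst).Nodup :=
    (hperm.map Prod.fst).nodup_iff.mpr h
  have hne : (PySem.List.sorted d (fun kv => kv.1) false).Pairwise (fun a b => a.1 ≠ b.1) :=
    (List.pairwise_map).mp hnd
  exact (hpw.and hne).imp (fun h => lt_of_le_of_ne h.1 h.2)

-- B side: the fold equals the library sort of d by key (keys nodup)
theorem kavFold_eq_sorted (d : List (Int × Int)) (h : (d.map Prod.fst).Nodup) :
    PySem.List.sorted d (fun kv => kv.1) false
      = d.foldl (fun acc kv =>
          PySem.List.insert acc ((kavFindPos acc kv.1 acc.length 0 acc.length : Nat) : Int) kv) [] := by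
  rcases kavFold_perm_pairwise d with ⟨hperm, hle⟩
  have hnd : ((d.foldl (fun acc kv =>
      PySem.List.insert acc ((kavFindPos acc kv.1 acc.length 0 acc.length : Nat) : Int) kv) []).map
      Prod.fst).Nodup := (hperm.map Prod.fst).nodup_iff.mpr h
  have hne : (d.foldl (fun acc kv =>
      PySem.List.insert acc ((kavFindPos acc kv.1 acc.length 0 acc.length : Nat) : Int) kv) []).Pairwise
      (fun a b => a.1 ≠ b.1) := (List.pairwise_map).mp hnd
  exact PySem.List.sorted_eq_of_perm_of_pairwise_lt _ _ _ hperm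
    ((hle.and hne).imp (fun h => lt_of_le_of_ne h.1 h.2))

-- first-match lookup in d of a key of a sorted pair returns that pair's value
theorem lookup_sorted (d : List (Int × Int)) (h : (d.map Prod.fst).Nodup)
    (kv : Int × Int) (hmem : kv ∈ PySem.List.sorted d (fun kv => kv.1) false) :
    PySem.Dict.getD (PySem.Dict.mk d) kv.1 0 = kv.2 := by
  have hmemd : kv ∈ d := (PySem.List.mem_sorted _ _ _ _).mp hmem
  exact PySem.Dict.getD_of_mem_items (d := PySem.Dict.mk d) hmemd h 0

theorem keys_and_values_eq (d : List (Int × Int)) (h : Pre_keys_and_values d) :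
    keys_and_values d = keys_and_values_alt d := by
  unfold Pre_keys_and_values at h
  have hperm : (PySem.List.sorted d (fun kv => kv.1) false).Perm d :=
    PySem.List.sorted_perm d (fun kv => kv.1) false
  have hlt := sorted_items_pairwise_lt d h
  -- A's first loop builds the key list
  have h1 : d.foldl (fun acc kv => acc ++ [kv.1]) [] = d.map (fun kv => kv.1) :=
    PySem.List.foldl_append_singleton_eq_map (l := d) (f := fun kv => kv.1) (acc := [])
  -- A's sorted keys are the keys of the sorted items
  have h2 : PySem.List.sorted (d.map (fun kv => kv.1)) (fun k => k) false
      = (PySem.List.sorted d (fun kv => kv.1) false).map (fun kv => kv.1) := by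
    exact PySem.List.sorted_eq_of_perm_of_pairwise_lt _ _ _ (hperm.map _)
      ((List.pairwise_map).mpr hlt)
  -- A's second loop maps the lookup over the sorted keys
  have h3 : ((PySem.List.sorted d (fun kv => kv.1) false).map (fun kv => kv.1)).foldl
        (fun acc k => acc ++ [PySem.Dict.getD (PySem.Dict.mk d) k 0]) []
      = (PySem.List.sorted d (fun kv => kv.1) false).map (fun kv => kv.2) := by
    rw [PySem.List.foldl_append_singleton_eq_map, List.nil_append, List.map_map]
    exact List.map_congr_left (fun kv hkv => lookup_sorted d h kv hkv)
  -- B's insertion fold is the sorted item list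
  have h4 := kavFold_eq_sorted d h
  unfold keys_and_values keys_and_values_alt
  simp only [h1, h2, h3, ← h4]

-- ===== VERDICT (by name: the statement is the Claim_ definition above) =====
theorem keys_and_values_spec : Claim_equal_keys_and_values := by
  intro d _ hpre
  exact keys_and_values_eq d hpre
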